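-- pv_equiv track=rewrite | github.com/Jirehlov/SiglusSceneScriptUtility | src/siglus_ssu/tutorial.py | _collapse_edge_records
-- ===== SOURCE A (Python) =====
-- def _safe_text(value) -> str:
--     if value is None:
--         return ""
--     try:
--         return str(value)
--     except Exception:
--         return ""
--
-- def _collapse_edge_records(records) -> tuple[str, str, bool]:
--     items = list(records or ())
--     if not items:
--         return ("flow", "", False)
--     if len(items) == 1:
--         _target_id, kind, label, cross_scene = items[0]
--         return (_safe_text(kind), _safe_text(label), bool(cross_scene))
--     preferred_kinds = (
--         "branch_true",
--         "branch_false",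
--         "return",
--         "sel_start_call",
--         "frame_action",
--         "button_call",
--         "jump",
--         "farcall",
--         "gosub",
--         "gosubstr",
--         "goto",
--         "fallthrough",
--     )
--     kind_set = {_safe_text(item[1]) for item in items if _safe_text(item[1])}
--     kind = next(
--         (name for name in preferred_kinds if name in kind_set),
--         _safe_text(items[0][1]) or "flow",
--     )
--     labels = []
--     seen = set()
--     for item in items:
--         label = _safe_text(item[2]).strip()
--         if not label or label == "false":
--             continue
--         if label in seen:
--             continue
--         seen.add(label)
--         labels.append(label)
--     if not labels:
--         fallback = []
--         seen = set()
--         for item in items: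
--             label = _safe_text(item[2]).strip()
--             if not label:
--                 continue
--             if label in seen:
--                 continue
--             seen.add(label)
--             fallback.append(label)
--         labels = fallback
--     label_set = list(labels)
--     label = label_set[0] if len(label_set) == 1 else " / ".join(label_set)
--     return (kind or "flow", label, any(bool(item[3]) for item in items))
-- ===== SOURCE B (Python) =====
-- def _safe_text(value) -> str:
--     if value is None:
--         return ""
--     try:
--         return str(value)
--     except Exception:
--         return ""
--
-- def _collapse_edge_records(records) -> tuple[str, str, bool]:
--     items = list(records or ())
--     if not items:
--         return ("flow", "", False)
--     if len(items) == 1: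
--         _target_id, kind, label, cross_scene = items[0]
--         return (_safe_text(kind), _safe_text(label), bool(cross_scene))
--     preferred_kinds = (
--         "branch_true",
--         "branch_false",
--         "return",
--         "sel_start_call",
--         "frame_action",
--         "button_call",
--         "jump",
--         "farcall",
--         "gosub",
--         "gosubstr",
--         "goto",
--         "fallthrough",
--     )
--     n = len(preferred_kinds)
--     best = n  # smallest preferred-kind rank seen so far
--     strict = []  # unique stripped labels, excluding "" and "false"
--     loose = []   # unique stripped labels, excluding only ""
--     cross = False
--     for item in items:
--         k = _safe_text(item[1])
--         r = preferred_kinds.index(k) if k in preferred_kinds else n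
--         best = min(best, r)
--         lab = _safe_text(item[2]).strip()
--         if lab:
--             if lab != "false" and lab not in strict:
--                 strict.append(lab)
--             if lab not in loose:
--                 loose.append(lab)
--         cross = cross or bool(item[3])
--     if best < n:
--         kind = preferred_kinds[best]
--     else:
--         kind = _safe_text(items[0][1]) or "flow"
--     labels = strict or loose
--     return (kind, " / ".join(labels), cross)
-- ===== Notes on version B (the rewrite author's own statement) =====
-- stated objective: alternative
-- what changed: Replaces A's four separate passes (set-comprehension + preferred-kind scan, strict-label loop, fallback-label loop, any()) by one fold over the items that tracks the minimum preferred-kind rank, both unique label lists (deduplicated against the output lists themselves, no auxiliary seen-set), and an OR-ed cross flag, then picks kind by rank and joins labels unconditionally.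
import Mathlib
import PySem

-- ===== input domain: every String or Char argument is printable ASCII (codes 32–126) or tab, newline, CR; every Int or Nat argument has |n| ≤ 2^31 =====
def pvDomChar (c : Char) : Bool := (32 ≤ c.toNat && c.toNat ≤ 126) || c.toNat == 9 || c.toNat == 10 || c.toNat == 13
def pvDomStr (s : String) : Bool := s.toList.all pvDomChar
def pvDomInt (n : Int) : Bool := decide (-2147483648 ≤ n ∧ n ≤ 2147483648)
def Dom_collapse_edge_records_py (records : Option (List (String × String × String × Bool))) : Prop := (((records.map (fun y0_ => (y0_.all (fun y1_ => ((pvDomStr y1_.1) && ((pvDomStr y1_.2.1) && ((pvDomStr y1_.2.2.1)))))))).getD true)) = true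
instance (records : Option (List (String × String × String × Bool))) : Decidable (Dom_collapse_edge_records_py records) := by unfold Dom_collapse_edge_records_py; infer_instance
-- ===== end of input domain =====

-- B does the collapse in ONE fold (min preferred-kind rank, both dedup label lists kept without a
-- seen-set, OR-ed cross flag) instead of A's four separate passes; same asymptotic cost.

-- ===== PORT A =====
-- the `preferred_kinds` tuple
def pvPreferredKinds : List String :=
  ["branch_true", "branch_false", "return", "sel_start_call", "frame_action", "button_call",
   "jump", "farcall", "gosub", "gosubstr", "goto", "fallthrough"]

-- _safe_text: on the typed domain every argument is a str, so str(value) is the value itself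
def pvSafeText (s : String) : String := s

-- loop body of A's strict-label loop (state = (seen, labels))
def pvStepStrictA (acc : PySem.Set String × List String) (it : String × String × String × Bool) :
    PySem.Set String × List String :=
  let label := PySem.Str.strip (pvSafeText it.2.2.1)
  if label = "" ∨ label = "false" then acc
  else if PySem.Set.contains acc.1 label then acc
  else (PySem.Set.add acc.1 label, acc.2 ++ [label])

-- loop body of A's fallback-label loop
def pvStepLooseA (acc : PySem.Set String × List String) (it : String × String × String × Bool) :
    PySem.Set String × List String :=
  let label := PySem.Str.strip (pvSafeText it.2.2.1)
  if label = "" then acc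
  else if PySem.Set.contains acc.1 label then acc
  else (PySem.Set.add acc.1 label, acc.2 ++ [label])

def collapse_edge_records_py (records : Option (List (String × String × String × Bool))) : String × String × Bool :=
  let items := records.getD []
  match items with
  | [] => ("flow", "", false)
  | [it] => (pvSafeText it.2.1, pvSafeText it.2.2.1, it.2.2.2)
  | it0 :: it1 :: rest =>
    let items := it0 :: it1 :: rest
    -- kind_set = {_safe_text(item[1]) for item in items if _safe_text(item[1])}
    let kindSet : PySem.Set String :=
      PySem.Set.ofList (items.filterMap (fun it =>
        if pvSafeText it.2.1 ≠ "" then some (pvSafeText it.2.1) else none))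
    -- kind = next((name for name in preferred_kinds if name in kind_set), _safe_text(items[0][1]) or "flow")
    let kind := (pvPreferredKinds.find? (fun name => PySem.Set.contains kindSet name)).getD
      (if pvSafeText it0.2.1 ≠ "" then pvSafeText it0.2.1 else "flow")
    let labels := (items.foldl pvStepStrictA (PySem.Set.empty, [])).2
    let labels := if labels = [] then (items.foldl pvStepLooseA (PySem.Set.empty, [])).2 else labels
    let label_set := labels
    let label := if label_set.length = 1 then label_set.headD "" else PySem.Str.join " / " label_set
    (if kind = "" then "flow" else kind, label, items.any (fun it => it.2.2.2))

-- ===== PORT B =====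
-- loop body of B's single pass (state = (best rank, strict labels, loose labels, cross))
def pvStepB (acc : Nat × List String × List String × Bool) (it : String × String × String × Bool) :
    Nat × List String × List String × Bool :=
  let r := if it.2.1 ∈ pvPreferredKinds then pvPreferredKinds.idxOf it.2.1 else pvPreferredKinds.length
  let best := min acc.1 r
  let lab := PySem.Str.strip (pvSafeText it.2.2.1)
  let strict := if lab ≠ "" ∧ lab ≠ "false" ∧ lab ∉ acc.2.1 then acc.2.1 ++ [lab] else acc.2.1
  let loose := if lab ≠ "" ∧ lab ∉ acc.2.2.1 then acc.2.2.1 ++ [lab] else acc.2.2.1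
  (best, strict, loose, acc.2.2.2 || it.2.2.2)

def collapse_edge_records_py_alt (records : Option (List (String × String × String × Bool))) : String × String × Bool :=
  let items := records.getD []
  match items with
  | [] => ("flow", "", false)
  | [it] => (pvSafeText it.2.1, pvSafeText it.2.2.1, it.2.2.2)
  | it0 :: it1 :: rest =>
    let items := it0 :: it1 :: rest
    let n := pvPreferredKinds.length
    let st := items.foldl pvStepB (n, [], [], false)
    let kind := if st.1 < n then pvPreferredKinds.getD st.1 ""
      else (if pvSafeText it0.2.1 ≠ "" then pvSafeText it0.2.1 else "flow")
    let labels := if st.2.1 = [] then st.2.2.1 else st.2.1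
    (kind, PySem.Str.join " / " labels, st.2.2.2)

-- ===== PRECONDITION & SPEC =====
def Spec_collapse_edge_records_py (records : Option (List (String × String × String × Bool))) (out : String × String × Bool) : Prop := out = collapse_edge_records_py_alt records
instance (records : Option (List (String × String × String × Bool))) (out : String × String × Bool) : Decidable (Spec_collapse_edge_records_py records out) := by unfold Spec_collapse_edge_records_py; infer_instance

-- ===== CLAIM (what is proved, stated in full; the proofs are below) =====
def Claim_equal_collapse_edge_records_py : Prop := ∀ (records : Option (List (String × String × String × Bool))), Dom_collapse_edge_records_py records → Spec_collapse_edge_records_py records (collapse_edge_records_py records)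

-- ===== LEMMAS AND PROOFS =====

-- B-side loop bodies split into their independent components (proof helpers)
def pvStepS (b : List String) (it : String × String × String × Bool) : List String :=
  let lab := PySem.Str.strip (pvSafeText it.2.2.1)
  if lab ≠ "" ∧ lab ≠ "false" ∧ lab ∉ b then b ++ [lab] else b

def pvStepL (b : List String) (it : String × String × String × Bool) : List String :=
  let lab := PySem.Str.strip (pvSafeText it.2.2.1)
  if lab ≠ "" ∧ lab ∉ b then b ++ [lab] else b

theorem pv_foldl_or {α : Type} (f : α → Bool) : ∀ (l : List α) (d : Bool),
    l.foldl (fun x it => x || f it) d = (d || l.any f) := by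
  intro l; induction l with
  | nil => simp
  | cons x xs ih =>
    intro d
    simp only [List.foldl, List.any_cons]
    rw [ih, Bool.or_assoc]

theorem pv_find?_congr {α : Type} (p q : α → Bool) : ∀ (l : List α),
    (∀ x ∈ l, p x = q x) → l.find? p = l.find? q := by
  intro l; induction l with
  | nil => simp
  | cons x xs ih =>
    intro h; simp only [List.find?_cons]
    rw [h x (by simp)]
    cases q x <;> simp [ih (fun y hy => h y (by simp [hy]))]

theorem pv_foldl_min_le_init {α : Type} (f : α → Nat) : ∀ (l : List α) (a : Nat),
    l.foldl (fun x k => min x (f k)) a ≤ a := by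
  intro l; induction l with
  | nil => simp
  | cons x xs ih => intro a; exact le_trans (ih (min a (f x))) (by omega)

theorem pv_foldl_min_le_mem {α : Type} (f : α → Nat) : ∀ (l : List α) (a : Nat) (k : α),
    k ∈ l → l.foldl (fun x k => min x (f k)) a ≤ f k := by
  intro l; induction l with
  | nil => simp
  | cons x xs ih =>
    intro a k hk
    simp only [List.foldl]
    rcases List.mem_cons.mp hk with rfl | hk
    · exact le_trans (pv_foldl_min_le_init f xs _) (min_le_right _ _)
    · exact ih _ k hk

theorem pv_foldl_min_succ {α : Type} (f g : α → Nat) : ∀ (l : List α) (a : Nat),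
    (∀ k ∈ l, f k = g k + 1) →
    l.foldl (fun x k => min x (f k)) (a + 1) = l.foldl (fun x k => min x (g k)) a + 1 := by
  intro l; induction l with
  | nil => simp
  | cons x xs ih =>
    intro a h
    simp only [List.foldl]
    rw [h x (by simp), Nat.succ_min_succ]
    exact ih _ (fun y hy => h y (by simp [hy]))

-- first preferred name occurring in ks = the element at the minimum rank of ks's elements
theorem pv_find_min_rank : ∀ (ps ks : List String),
    ps.find? (fun p => decide (p ∈ ks)) =
      ps[ks.foldl (fun a k => min a (ps.idxOf k)) ps.length]? := by
  intro ps; induction ps with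
  | nil => intro ks; simp
  | cons p ps ih =>
    intro ks
    by_cases hp : p ∈ ks
    · have h0 : ks.foldl (fun a k => min a (List.idxOf k (p :: ps))) (ps.length + 1) = 0 := by
        have hle := pv_foldl_min_le_mem (fun k => List.idxOf k (p :: ps)) ks (ps.length + 1) p hp
        simp only [] at hle
        have h2 : List.idxOf p (p :: ps) = 0 := by simp
        rw [h2] at hle
        omega
      simp only [List.length_cons]
      rw [h0]
      simp [hp]
    · have hstep : ∀ k ∈ ks, List.idxOf k (p :: ps) = List.idxOf k ps + 1 := by
        intro k hk
        have hne : ¬ (p == k) = true := by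
          simp; rintro rfl; exact hp hk
        simp [List.idxOf_cons, hne]
      have hm : ks.foldl (fun a k => min a (List.idxOf k (p :: ps))) (ps.length + 1)
          = ks.foldl (fun a k => min a (List.idxOf k ps)) ps.length + 1 := by
        simpa using pv_foldl_min_succ _ _ ks ps.length hstep
      simp only [List.length_cons]
      rw [hm]
      simp [hp, ih ks]

-- B's tupled fold is the product of its four independent folds
theorem pv_fusion : ∀ (items : List (String × String × String × Bool))
    (a : Nat) (b c : List String) (d : Bool),
    items.foldl pvStepB (a, b, c, d) =
      (items.foldl (fun x it => min x (List.idxOf it.2.1 pvPreferredKinds)) a,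
       items.foldl pvStepS b,
       items.foldl pvStepL c,
       items.foldl (fun x it => x || it.2.2.2) d) := by
  intro items; induction items with
  | nil => intro a b c d; rfl
  | cons x xs ih =>
    intro a b c d
    simp only [List.foldl]
    rw [show pvStepB (a, b, c, d) x
        = (min a (List.idxOf x.2.1 pvPreferredKinds), pvStepS b x, pvStepL c x, d || x.2.2.2) by
      by_cases hx : x.2.1 ∈ pvPreferredKinds
      · simp [pvStepB, pvStepS, pvStepL, hx]
      · simp [pvStepB, pvStepS, pvStepL, hx]]
    exact ih _ _ _ _

-- A's strict-label loop (seen-set + output list) computes B's strict component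
theorem pv_strict_agree : ∀ (items : List (String × String × String × Bool))
    (seen : PySem.Set String) (labels : List String),
    (∀ x, x ∈ seen ↔ x ∈ labels) →
    (items.foldl pvStepStrictA (seen, labels)).2 = items.foldl pvStepS labels := by
  intro items; induction items with
  | nil => intro seen labels _; rfl
  | cons it its ih =>
    intro seen labels hinv
    simp only [List.foldl]
    by_cases hE : PySem.Str.strip (pvSafeText it.2.2.1) = "" ∨ PySem.Str.strip (pvSafeText it.2.2.1) = "false"
    · rw [show pvStepStrictA (seen, labels) it = (seen, labels) by simp [pvStepStrictA, hE],
          show pvStepS labels it = labels by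
            rcases hE with h | h <;> simp [pvStepS, h]]
      exact ih seen labels hinv
    · rw [not_or] at hE
      by_cases hm : PySem.Str.strip (pvSafeText it.2.2.1) ∈ labels
      · have hc : PySem.Str.strip (pvSafeText it.2.2.1) ∈ seen := (hinv _).mpr hm
        rw [show pvStepStrictA (seen, labels) it = (seen, labels) by
              simp [pvStepStrictA, hE.1, hE.2, hc],
            show pvStepS labels it = labels by simp [pvStepS, hm]]
        exact ih seen labels hinv
      · have hc : PySem.Str.strip (pvSafeText it.2.2.1) ∉ seen := fun h => hm ((hinv _).mp h)
        rw [show pvStepStrictA (seen, labels) it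
              = (PySem.Set.add seen (PySem.Str.strip (pvSafeText it.2.2.1)),
                 labels ++ [PySem.Str.strip (pvSafeText it.2.2.1)]) by
              simp [pvStepStrictA, hE.1, hE.2, hc],
            show pvStepS labels it = labels ++ [PySem.Str.strip (pvSafeText it.2.2.1)] by
              simp [pvStepS, hE.1, hE.2, hm]]
        refine ih _ _ (fun x => ?_)
        rw [PySem.Set.mem_add]
        simp [hinv x]
-- A's fallback-label loop computes B's loose component
theorem pv_loose_agree : ∀ (items : List (String × String × String × Bool))
    (seen : PySem.Set String) (labels : List String),
    (∀ x, x ∈ seen ↔ x ∈ labels) →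
    (items.foldl pvStepLooseA (seen, labels)).2 = items.foldl pvStepL labels := by
  intro items; induction items with
  | nil => intro seen labels _; rfl
  | cons it its ih =>
    intro seen labels hinv
    simp only [List.foldl]
    by_cases hE : PySem.Str.strip (pvSafeText it.2.2.1) = ""
    · rw [show pvStepLooseA (seen, labels) it = (seen, labels) by simp [pvStepLooseA, hE],
          show pvStepL labels it = labels by simp [pvStepL, hE]]
      exact ih seen labels hinv
    · by_cases hm : PySem.Str.strip (pvSafeText it.2.2.1) ∈ labels
      · have hc : PySem.Str.strip (pvSafeText it.2.2.1) ∈ seen := (hinv _).mpr hm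
        rw [show pvStepLooseA (seen, labels) it = (seen, labels) by simp [pvStepLooseA, hE, hc],
            show pvStepL labels it = labels by simp [pvStepL, hm]]
        exact ih seen labels hinv
      · have hc : PySem.Str.strip (pvSafeText it.2.2.1) ∉ seen := fun h => hm ((hinv _).mp h)
        rw [show pvStepLooseA (seen, labels) it
              = (PySem.Set.add seen (PySem.Str.strip (pvSafeText it.2.2.1)),
                 labels ++ [PySem.Str.strip (pvSafeText it.2.2.1)]) by
              simp [pvStepLooseA, hE, hc],
            show pvStepL labels it = labels ++ [PySem.Str.strip (pvSafeText it.2.2.1)] by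
              simp [pvStepL, hE, hm]]
        refine ih _ _ (fun x => ?_)
        rw [PySem.Set.mem_add]
        simp [hinv x]

-- A's singleton special case is what join does anyway
theorem pv_join_one (ls : List String) :
    (if ls.length = 1 then ls.headD "" else PySem.Str.join " / " ls) = PySem.Str.join " / " ls := by
  match ls with
  | [] => rfl
  | [x] => simp [PySem.Str.join, PySem.Chars.join_singleton]
  | x :: y :: t => simp

theorem pv_preferred_ne_empty : ∀ p ∈ pvPreferredKinds, p ≠ "" := by decide

-- ===== VERDICT (by name: the statement is the Claim_ definition above) =====
set_option maxHeartbeats 2000000 in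
theorem collapse_edge_records_py_spec : Claim_equal_collapse_edge_records_py := by
  intro records _
  unfold Spec_collapse_edge_records_py
  match records with
  | none => rfl
  | some [] => rfl
  | some [it] => rfl
  | some (it0 :: it1 :: rest) =>
    simp only [collapse_edge_records_py, collapse_edge_records_py_alt, Option.getD_some]
    rw [pv_fusion]
    rw [pv_foldl_or (fun it => it.2.2.2) (it0 :: it1 :: rest) false]
    rw [pv_strict_agree (it0 :: it1 :: rest) PySem.Set.empty [] (by simp [PySem.Set.empty])]
    rw [pv_loose_agree (it0 :: it1 :: rest) PySem.Set.empty [] (by simp [PySem.Set.empty])]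
    rw [pv_join_one]
    have hpred : List.find?
        (fun name =>
          (PySem.Set.ofList
            (List.filterMap (fun it => if pvSafeText it.2.1 ≠ "" then some (pvSafeText it.2.1) else none)
              (it0 :: it1 :: rest))).contains name) pvPreferredKinds
        = List.find? (fun p => decide (p ∈ (it0 :: it1 :: rest).map (fun it => it.2.1))) pvPreferredKinds := by
      apply pv_find?_congr
      intro p hp
      have hpe := pv_preferred_ne_empty p hp
      rw [Bool.eq_iff_iff]
      simp only [PySem.Set.contains_eq_listContains, List.contains_iff_mem, decide_eq_true_eq,
        PySem.Set.mem_ofList, List.mem_filterMap, List.mem_map, pvSafeText]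
      constructor
      · rintro ⟨a, ha, hsome⟩
        by_cases h : a.2.1 = "" <;> simp [h] at hsome
        exact ⟨a, ha, hsome⟩
      · rintro ⟨a, ha, heq⟩
        refine ⟨a, ha, ?_⟩
        rw [heq]
        simp [hpe]
    rw [hpred, pv_find_min_rank, List.foldl_map]
    set m := (it0 :: it1 :: rest).foldl
      (fun (a : Nat) it => min a (List.idxOf it.2.1 pvPreferredKinds)) pvPreferredKinds.length with hmdef
    by_cases hm : m < pvPreferredKinds.length
    · rw [List.getElem?_eq_getElem hm]
      have hne : pvPreferredKinds[m] ≠ "" := pv_preferred_ne_empty _ (List.getElem_mem hm)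
      rw [List.getD_eq_getElem?_getD, List.getElem?_eq_getElem hm]
      rw [Option.getD_some, Option.getD_some, if_pos hm, if_neg hne, Bool.false_or]
    · have hle : m ≤ pvPreferredKinds.length := pv_foldl_min_le_init _ _ _
      rw [List.getElem?_eq_none (by omega)]
      have hfb : (if pvSafeText it0.2.1 ≠ "" then pvSafeText it0.2.1 else "flow") ≠ "" := by
        by_cases h : it0.2.1 = "" <;> simp [pvSafeText, h]
      rw [Option.getD_none, if_neg hfb, if_neg hm, Bool.false_or]
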